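-- pv_equiv track=rewrite | github.com/gustkdxo007/Solving-Algorithm | SWEA/PROBLEM/2115_벌꿀채쥐.py | select_beehive
-- ===== SOURCE A (Python) =====
-- import itertools
--
-- def select_beehive(beehives, c):
--     max_honey = 0
--     for i in range(len(beehives), 0, -1):
--         selected_honey = list(itertools.combinations(beehives, i))
--         for sh in selected_honey:
--             if sum(sh) > c: continue
--             honey = 0
--             for h in sh:
--                 honey += (h * h)
--             max_honey = max(max_honey, honey)
--     return max_honey
-- ===== SOURCE B (Python) =====
-- def select_beehive(beehives, c):
--     # include/exclude recursion over the list: best(i, cap) is the max sum of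
--     # squares over subsets of beehives[i:] whose sum is <= cap, or -1 if no
--     # such subset exists (squares are nonnegative, so -1 is a safe bottom).
--     def best(i, cap):
--         if i == len(beehives):
--             return 0 if cap >= 0 else -1
--         h = beehives[i]
--         skip = best(i + 1, cap)
--         sub = best(i + 1, cap - h)
--         take = h * h + sub if sub >= 0 else -1
--         return max(skip, take)
--     return max(0, best(0, c))
-- ===== Notes on version B (the rewrite author's own statement) =====
-- stated objective: alternative
-- what changed: Replaces the itertools.combinations enumeration grouped by subset size with a direct include/exclude recursion over the list that threads the remaining capacity and returns -1 for infeasible branches.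
import Mathlib
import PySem

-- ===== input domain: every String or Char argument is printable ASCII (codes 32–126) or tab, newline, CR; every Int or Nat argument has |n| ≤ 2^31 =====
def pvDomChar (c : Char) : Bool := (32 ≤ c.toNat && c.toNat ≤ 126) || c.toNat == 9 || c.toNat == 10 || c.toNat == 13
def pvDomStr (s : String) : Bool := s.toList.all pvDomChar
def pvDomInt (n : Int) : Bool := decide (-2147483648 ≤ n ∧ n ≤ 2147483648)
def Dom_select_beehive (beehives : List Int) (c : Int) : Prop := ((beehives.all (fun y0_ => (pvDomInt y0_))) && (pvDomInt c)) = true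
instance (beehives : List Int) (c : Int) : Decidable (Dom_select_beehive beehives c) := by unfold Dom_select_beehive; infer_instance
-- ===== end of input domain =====

-- B replaces the size-grouped itertools.combinations enumeration with a direct
-- include/exclude recursion threading the remaining capacity (objective: alternative).


-- ===== PORT A =====
-- itertools.combinations(xs, i), as the lists of chosen elements in itertools' order
def pvCombos : Nat → List Int → List (List Int)
  | 0, _ => [[]]
  | _ + 1, [] => []
  | n + 1, x :: xs => (pvCombos n xs).map (x :: ·) ++ pvCombos (n + 1) xs

-- the inner accumulation  honey = 0; for h in sh: honey += h * h
def pvSqsum (sh : List Int) : Int := sh.foldl (fun honey h => honey + h * h) 0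

def select_beehive (beehives : List Int) (c : Int) : Int :=
  (PySem.List.pyRange (beehives.length : Int) 0 (-1)).foldl
    (fun max_honey i =>
      (pvCombos i.toNat beehives).foldl
        (fun mh sh => if sh.sum > c then mh else max mh (pvSqsum sh)) max_honey)
    0

-- ===== PORT B =====
-- best: max sum of squares over subsets of the remaining list with sum ≤ cap, -1 if none
def pvBest : List Int → Int → Int
  | [], cap => if 0 ≤ cap then 0 else -1
  | h :: rest, cap =>
    let skip := pvBest rest cap
    let sub := pvBest rest (cap - h)
    let take := if 0 ≤ sub then h * h + sub else -1
    max skip take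

def select_beehive_alt (beehives : List Int) (c : Int) : Int :=
  max 0 (pvBest beehives c)

-- ===== PRECONDITION & SPEC =====
def Spec_select_beehive (beehives : List Int) (c : Int) (out : Int) : Prop := out = select_beehive_alt beehives c
instance (beehives : List Int) (c : Int) (out : Int) : Decidable (Spec_select_beehive beehives c out) := by unfold Spec_select_beehive; infer_instance

-- ===== CLAIM (what is proved, stated in full; the proofs are below) =====
def Claim_equal_select_beehive : Prop := ∀ (beehives : List Int) (c : Int), Dom_select_beehive beehives c → Spec_select_beehive beehives c (select_beehive beehives c)

-- ===== LEMMAS AND PROOFS =====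

-- A's inner loop as a function of the list of candidate subsets
def pvF (c : Int) (l : List (List Int)) (b : Int) : Int :=
  l.foldl (fun mh sh => if sh.sum > c then mh else max mh (pvSqsum sh)) b

-- all sublists of xs, built by include/exclude (B's traversal order)
def pvSubs : List Int → List (List Int)
  | [] => [[]]
  | x :: t => pvSubs t ++ (pvSubs t).map (x :: ·)

-- combinations of sizes k, k-1, …, 1 concatenated (A's traversal order)
def pvCatDesc : Nat → List Int → List (List Int)
  | 0, _ => []
  | k + 1, xs => pvCombos (k + 1) xs ++ pvCatDesc k xs

-- combinations of sizes 0, 1, …, k concatenated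
def pvUpTo : Nat → List Int → List (List Int)
  | 0, xs => pvCombos 0 xs
  | k + 1, xs => pvUpTo k xs ++ pvCombos (k + 1) xs

lemma pvSqsum_shift (s : List Int) (b : Int) :
    s.foldl (fun a h => a + h * h) b = b + pvSqsum s := by
  induction s generalizing b with
  | nil => simp [pvSqsum]
  | cons x t ih =>
    show t.foldl _ (b + x * x) = b + pvSqsum (x :: t)
    have h : pvSqsum (x :: t) = t.foldl (fun a h => a + h * h) (0 + x * x) := rfl
    rw [h, ih, ih]; ring

lemma pvSqsum_cons (x : Int) (s : List Int) : pvSqsum (x :: s) = x * x + pvSqsum s := by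
  have h : pvSqsum (x :: s) = s.foldl (fun a h => a + h * h) (0 + x * x) := rfl
  rw [h, pvSqsum_shift]; ring

lemma pvSqsum_nonneg (s : List Int) : 0 ≤ pvSqsum s := by
  induction s with
  | nil => simp [pvSqsum]
  | cons x t ih =>
    rw [pvSqsum_cons]
    have := mul_self_nonneg x
    omega

lemma pvF_nil (c b : Int) : pvF c [] b = b := rfl

lemma pvF_cons (c : Int) (s : List Int) (t : List (List Int)) (b : Int) :
    pvF c (s :: t) b = pvF c t (if s.sum > c then b else max b (pvSqsum s)) := rfl

lemma pvF_append (c : Int) (l1 l2 : List (List Int)) (b : Int) :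
    pvF c (l1 ++ l2) b = pvF c l2 (pvF c l1 b) := List.foldl_append

lemma pvF_max (c : Int) (l : List (List Int)) :
    ∀ b1 b2 : Int, pvF c l (max b1 b2) = max b1 (pvF c l b2) := by
  induction l with
  | nil => intro b1 b2; simp [pvF]
  | cons s t ih =>
    intro b1 b2
    rw [pvF_cons, pvF_cons]
    by_cases hs : s.sum > c
    · simp [hs, ih]
    · rw [if_neg hs, if_neg hs, max_assoc, ih]

lemma pvF_perm (c : Int) {l1 l2 : List (List Int)} (h : l1.Perm l2) (b : Int) :
    pvF c l1 b = pvF c l2 b := by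
  haveI : RightCommutative (fun (mh : Int) (sh : List Int) =>
      if sh.sum > c then mh else max mh (pvSqsum sh)) := by
    constructor
    intro b s1 s2
    dsimp only
    split_ifs <;> omega
  exact h.foldl_eq b

-- the outer loop over range(len, 0, -1) concatenates the size-k combination lists
lemma pvOuter (xs : List Int) (c : Int) : ∀ (k : Nat) (b : Int),
    (PySem.List.pyRange (k : Int) 0 (-1)).foldl
      (fun mh i => pvF c (pvCombos i.toNat xs) mh) b = pvF c (pvCatDesc k xs) b := by
  intro k
  induction k with
  | zero => intro b; rw [PySem.List.pyRange_neg_one_eq_nil (by norm_num)]; rfl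
  | succ k ih =>
    intro b
    rw [PySem.List.pyRange_neg_one_cons (by exact_mod_cast Nat.succ_pos k)]
    simp only [List.foldl_cons]
    have h1 : ((k + 1 : Nat) : Int) - 1 = (k : Int) := by push_cast; ring
    have h2 : ((k + 1 : Nat) : Int).toNat = k + 1 := Int.toNat_natCast _
    rw [h1, h2, ih]
    rw [show pvCatDesc (k + 1) xs = pvCombos (k + 1) xs ++ pvCatDesc k xs from by simp [pvCatDesc],
      pvF_append]

lemma pvCombos_eq_nil : ∀ (xs : List Int) (i : Nat), xs.length < i → pvCombos i xs = [] := by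
  intro xs
  induction xs with
  | nil => intro i hi; match i, hi with | i + 1, _ => simp [pvCombos]
  | cons x t ih =>
    intro i hi
    match i, hi with
    | i + 1, hi =>
      rw [show pvCombos (i + 1) (x :: t) = (pvCombos i t).map (x :: ·) ++ pvCombos (i + 1) t from by simp [pvCombos]]
      have h1 : pvCombos i t = [] := ih i (by simp at hi; omega)
      have h2 : pvCombos (i + 1) t = [] := ih (i + 1) (by simp at hi; omega)
      simp [h1, h2]

lemma pvPerm_catDesc_upTo (xs : List Int) : ∀ k : Nat,
    (([] : List Int) :: pvCatDesc k xs).Perm (pvUpTo k xs) := by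
  intro k
  induction k with
  | zero =>
    simp only [pvCatDesc, pvUpTo, pvCombos]
    exact List.Perm.refl _
  | succ k ih =>
    have ihm := Multiset.coe_eq_coe.mpr ih
    rw [← Multiset.coe_eq_coe]
    simp only [pvCatDesc, pvUpTo]
    simp only [← Multiset.cons_coe, ← Multiset.coe_add, ← Multiset.singleton_add] at ihm ⊢
    rw [← ihm]
    abel

lemma pvUpTo_cons (x : Int) (t : List Int) : ∀ k : Nat,
    (pvUpTo (k + 1) (x :: t)).Perm (pvUpTo (k + 1) t ++ (pvUpTo k t).map (x :: ·)) := by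
  intro k
  induction k with
  | zero =>
    rw [← Multiset.coe_eq_coe]
    simp only [pvUpTo, pvCombos, List.map_cons, List.map_nil]
    simp only [← Multiset.cons_coe, ← Multiset.coe_add, ← Multiset.singleton_add]
    abel
  | succ k ih =>
    have ihm := Multiset.coe_eq_coe.mpr ih
    have e : pvUpTo (k + 1) t = pvUpTo k t ++ pvCombos (k + 1) t := by simp [pvUpTo]
    rw [← Multiset.coe_eq_coe]
    rw [show pvUpTo (k + 1 + 1) (x :: t) = pvUpTo (k + 1) (x :: t) ++ pvCombos (k + 1 + 1) (x :: t) from by simp [pvUpTo],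
      show pvCombos (k + 1 + 1) (x :: t) = (pvCombos (k + 1) t).map (x :: ·) ++ pvCombos (k + 1 + 1) t from by simp [pvCombos],
      show pvUpTo (k + 1 + 1) t = pvUpTo (k + 1) t ++ pvCombos (k + 1 + 1) t from by simp [pvUpTo]]
    rw [e] at ihm ⊢
    simp only [List.map_append, ← Multiset.coe_add] at ihm ⊢
    rw [ihm]
    abel

lemma pvPerm_upTo_subs : ∀ xs : List Int, (pvUpTo xs.length xs).Perm (pvSubs xs) := by
  intro xs
  induction xs with
  | nil => simp [pvUpTo, pvCombos, pvSubs]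
  | cons x t ih =>
    have h1 := pvUpTo_cons x t t.length
    have h2 : pvUpTo (t.length + 1) t = pvUpTo t.length t := by
      rw [show pvUpTo (t.length + 1) t = pvUpTo t.length t ++ pvCombos (t.length + 1) t from by simp [pvUpTo],
        pvCombos_eq_nil t (t.length + 1) (by omega)]
      simp
    rw [h2] at h1
    refine h1.trans (List.Perm.append ih (ih.map _)) |>.trans ?_
    simp [pvSubs]

-- the shifted inner fold over the subsets of t that result from mapping (x :: ·)
lemma pvShift (k x c : Int) (hk : 0 ≤ k) (l : List (List Int)) : ∀ b : Int, -1 ≤ b →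
    l.foldl (fun mh s => if x + s.sum > c then mh else max mh (k + pvSqsum s)) b
      = max b (if 0 ≤ pvF (c - x) l (-1) then k + pvF (c - x) l (-1) else -1) := by
  induction l with
  | nil =>
    intro b hb
    have h : ¬ (0 : Int) ≤ -1 := by norm_num
    rw [List.foldl_nil, pvF_nil, if_neg h]
    omega
  | cons s t ih =>
    intro b hb
    have hq : 0 ≤ pvSqsum s := pvSqsum_nonneg s
    by_cases hs : x + s.sum > c
    · have hs' : s.sum > c - x := by omega
      rw [List.foldl_cons, if_pos hs, ih b hb, pvF_cons, if_pos hs']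
    · have hs' : ¬ s.sum > c - x := by omega
      rw [List.foldl_cons, if_neg hs, ih (max b (k + pvSqsum s)) (by omega),
        pvF_cons, if_neg hs',
        show max (-1 : Int) (pvSqsum s) = max (pvSqsum s) (-1) from max_comm _ _, pvF_max]
      split_ifs <;> omega

lemma pvBest_ge (xs : List Int) (cap : Int) : -1 ≤ pvBest xs cap := by
  cases xs with
  | nil => show -1 ≤ if 0 ≤ cap then 0 else -1; split <;> omega
  | cons h rest =>
    show -1 ≤ max (pvBest rest cap)
      (if 0 ≤ pvBest rest (cap - h) then h * h + pvBest rest (cap - h) else -1)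
    have := mul_self_nonneg h
    split <;> omega

lemma pvBest_eq (xs : List Int) : ∀ cap : Int, pvBest xs cap = pvF cap (pvSubs xs) (-1) := by
  induction xs with
  | nil =>
    intro cap
    show (if 0 ≤ cap then 0 else -1) = pvF cap [[]] (-1)
    rw [pvF_cons, pvF_nil, List.sum_nil, show pvSqsum [] = 0 from rfl]
    split_ifs <;> omega
  | cons x t ih =>
    intro cap
    show max (pvBest t cap)
        (if 0 ≤ pvBest t (cap - x) then x * x + pvBest t (cap - x) else -1) = _
    rw [show pvSubs (x :: t) = pvSubs t ++ (pvSubs t).map (x :: ·) from by simp [pvSubs],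
      pvF_append, ← ih cap]
    have hmap : pvF cap ((pvSubs t).map (x :: ·)) (pvBest t cap)
        = (pvSubs t).foldl
            (fun mh s => if x + s.sum > cap then mh else max mh (x * x + pvSqsum s))
            (pvBest t cap) := by
      simp only [pvF, List.foldl_map, List.sum_cons, pvSqsum_cons]
    rw [hmap, pvShift (x * x) x cap (mul_self_nonneg x) (pvSubs t) (pvBest t cap) (pvBest_ge t cap),
      ← ih (cap - x)]

lemma pvA_char (xs : List Int) (c : Int) : select_beehive xs c = pvF c (pvSubs xs) 0 := by
  show (PySem.List.pyRange (xs.length : Int) 0 (-1)).foldl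
      (fun mh i => pvF c (pvCombos i.toNat xs) mh) 0 = _
  rw [pvOuter xs c xs.length 0]
  have h0 : pvF c (([] : List Int) :: pvCatDesc xs.length xs) 0 = pvF c (pvCatDesc xs.length xs) 0 := by
    rw [pvF_cons, List.sum_nil, show pvSqsum [] = 0 from rfl]
    simp
  rw [← h0, pvF_perm c ((pvPerm_catDesc_upTo xs xs.length).trans (pvPerm_upTo_subs xs)) 0]

-- ===== VERDICT (by name: the statement is the Claim_ definition above) =====
theorem select_beehive_spec : Claim_equal_select_beehive := by
  unfold Claim_equal_select_beehive
  intro xs c _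
  unfold Spec_select_beehive
  show select_beehive xs c = max 0 (pvBest xs c)
  rw [pvA_char, pvBest_eq, ← pvF_max c (pvSubs xs) 0 (-1)]
  norm_num
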